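-- pv_equiv track=rewrite | github.com/hskrasek/spellcheck | spellCheck.py | eliminate_duplicate
-- ===== SOURCE A (Python) =====
-- import os, itertools
--
-- def eliminate_duplicate(word):
--     rtn = []
--     enumerated_word = [[k, 2] if len(list(v)) >= 2 else [k, 1] for k,v in itertools.groupby(word)]
--     duplicate_count = len([elem for elem in enumerated_word if elem[1] == 2])
--     permutations = itertools.product("12", repeat = duplicate_count)
--     for elem in permutations:
--         tmp = ""
--         duplicate_index = 0
--         for char in enumerated_word:
--             if char[1] == 2:
--                 tmp += char[0] * int(elem[duplicate_index])
--                 duplicate_index += 1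
--             else:
--                 tmp += char[0]
--         rtn.append(tmp)
--     return rtn
-- ===== SOURCE B (Python) =====
-- import itertools
--
-- def eliminate_duplicate(word):
--     results = [""]
--     for k, v in itertools.groupby(word):
--         opts = [k] if len(list(v)) == 1 else [k, k + k]
--         results = [p + o for p in results for o in opts]
--     return results
-- ===== Notes on version B (the rewrite author's own statement) =====
-- stated objective: simpler
-- what changed: Replaces A's precomputed duplicate_count, itertools.product over '12' digit tuples and the duplicate_index bookkeeping with a single left fold over the runs that extends every partial result by the run's one or two allowed expansions.
import Mathlib
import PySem

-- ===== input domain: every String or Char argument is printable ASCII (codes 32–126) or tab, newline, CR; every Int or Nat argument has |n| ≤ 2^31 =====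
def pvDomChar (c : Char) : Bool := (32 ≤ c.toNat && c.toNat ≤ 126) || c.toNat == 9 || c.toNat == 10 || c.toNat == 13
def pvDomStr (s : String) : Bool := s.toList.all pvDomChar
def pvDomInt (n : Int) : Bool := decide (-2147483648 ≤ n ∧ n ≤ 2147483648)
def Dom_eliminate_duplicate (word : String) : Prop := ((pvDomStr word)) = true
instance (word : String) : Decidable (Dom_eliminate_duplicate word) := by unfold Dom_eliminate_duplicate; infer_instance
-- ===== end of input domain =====

-- B replaces A's duplicate_count / itertools.product / duplicate_index machinery with one
-- left fold over the runs that extends every partial result by the run's allowed expansions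
-- (objective: simpler).

-- ===== PORT A =====
-- itertools.groupby(word): the list of (key, run length) pairs (shared by both ports,
-- since both Pythons call groupby).
def pvRunsAux (k : Char) (n : Nat) : List Char → List (Char × Nat)
  | [] => [(k, n)]
  | c :: rest => if c = k then pvRunsAux k (n + 1) rest else (k, n) :: pvRunsAux c 1 rest

def pvRuns : List Char → List (Char × Nat)
  | [] => []
  | c :: rest => pvRunsAux c 1 rest

-- itertools.product("12", repeat = n): all length-n tuples over ['1','2'], leftmost slot slowest.
def pvProd12 : Nat → List (List Char)
  | 0 => [[]]
  | n + 1 => (['1', '2'] : List Char).flatMap (fun d => (pvProd12 n).map (fun t => d :: t))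

-- A's inner loop: tmp and duplicate_index threaded over enumerated_word;
-- `int(elem[duplicate_index])` = digit value of the indexed char (always in range in A).
def pvInner : List (Char × Nat) → List Char → Nat → String → String
  | [], _, _, tmp => tmp
  | (k, t) :: rest, elem, idx, tmp =>
    if t == 2 then
      let d := (PySem.List.pyGet? elem (Int.ofNat idx)).getD '1'
      pvInner rest elem (idx + 1) (tmp ++ String.ofList (List.replicate (d.toNat - 48) k))
    else
      pvInner rest elem idx (tmp ++ String.ofList [k])

def eliminate_duplicate (word : String) : List String :=
  let enumerated := (pvRuns word.toList).map (fun p => (p.1, if 2 ≤ p.2 then 2 else 1))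
  let dup := (enumerated.filter (fun p => p.2 == 2)).length
  (pvProd12 dup).map (fun elem => pvInner enumerated elem 0 "")

-- ===== PORT B =====
def eliminate_duplicate_alt (word : String) : List String :=
  (pvRuns word.toList).foldl
    (fun acc p =>
      let opts := if p.2 == 1 then [String.ofList [p.1]] else [String.ofList [p.1], String.ofList [p.1, p.1]]
      acc.flatMap (fun pre => opts.map (fun o => pre ++ o)))
    [""]

-- ===== PRECONDITION & SPEC =====
def Spec_eliminate_duplicate (word : String) (out : List String) : Prop := out = eliminate_duplicate_alt word
instance (word : String) (out : List String) : Decidable (Spec_eliminate_duplicate word out) := by unfold Spec_eliminate_duplicate; infer_instance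

-- ===== CLAIM (what is proved, stated in full; the proofs are below) =====
def Claim_equal_eliminate_duplicate : Prop := ∀ (word : String), Dom_eliminate_duplicate word → Spec_eliminate_duplicate word (eliminate_duplicate word)

-- ===== LEMMAS AND PROOFS =====

-- Common reference function: the expansions of a run list, front run slowest.
def pvSpec : List (Char × Nat) → List String
  | [] => [""]
  | (k, n) :: rest =>
      (if n == 1 then [String.ofList [k]] else [String.ofList [k], String.ofList [k, k]]).flatMap
        (fun o => (pvSpec rest).map (fun s => o ++ s))

-- run lengths produced by groupby are ≥ 1
theorem pvRunsAux_pos (l : List Char) : ∀ (k : Char) (n : Nat), 1 ≤ n →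
    ∀ p ∈ pvRunsAux k n l, 1 ≤ p.2 := by
  induction l with
  | nil => intro k n hn p hp; simp [pvRunsAux] at hp; subst hp; exact hn
  | cons c rest ih =>
      intro k n hn p hp
      simp only [pvRunsAux] at hp
      by_cases hc : c = k
      · rw [if_pos hc] at hp; exact ih k (n + 1) (by omega) p hp
      · rw [if_neg hc] at hp
        rcases List.mem_cons.1 hp with hp | hp
        · subst hp; exact hn
        · exact ih c 1 le_rfl p hp

theorem pvRuns_pos (l : List Char) : ∀ p ∈ pvRuns l, 1 ≤ p.2 := by
  cases l with
  | nil => simp [pvRuns]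
  | cons c rest => exact pvRunsAux_pos rest c 1 le_rfl

-- elements of pvProd12 n have length n
theorem pvProd12_length : ∀ (n : Nat), ∀ e ∈ pvProd12 n, e.length = n := by
  intro n
  induction n with
  | zero => simp [pvProd12]
  | succ m ih =>
      intro e he
      simp [pvProd12] at he
      rcases he with ⟨t, ht, rfl⟩ | ⟨t, ht, rfl⟩ <;> simp [ih t ht]

def pvDcount (l : List (Char × Nat)) : Nat := (l.filter (fun p => p.2 == 2)).length

-- pvG: what pvInner computes, consuming the digit list structurally
def pvG : List (Char × Nat) → List Char → String
  | [], _ => ""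
  | (k, t) :: rest, ds =>
      if t == 2 then
        match ds with
        | [] => ""
        | d :: ds' => String.ofList (List.replicate (d.toNat - 48) k) ++ pvG rest ds'
      else String.ofList [k] ++ pvG rest ds

theorem pvInner_eq_pvG (enum : List (Char × Nat)) :
    ∀ (elem : List Char) (idx : Nat) (tmp : String),
      idx + pvDcount enum ≤ elem.length →
      pvInner enum elem idx tmp = tmp ++ pvG enum (elem.drop idx) := by
  induction enum with
  | nil => intro elem idx tmp _; simp [pvInner, pvG]
  | cons p rest ih =>
      intro elem idx tmp h
      obtain ⟨k, t⟩ := p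
      by_cases ht : t = 2
      · subst ht
        have hdc : pvDcount ((k, 2) :: rest) = pvDcount rest + 1 := by
          simp [pvDcount, List.filter]
        rw [hdc] at h
        have hidx : idx < elem.length := by omega
        have hget : PySem.List.pyGet? elem (Int.ofNat idx) = some elem[idx] := by
          simp [PySem.List.pyGet?_ofNat (xs := elem) (n := idx) hidx]
        have hdrop : elem.drop idx = elem[idx] :: elem.drop (idx + 1) :=
          List.drop_eq_getElem_cons hidx
        simp only [pvInner, beq_self_eq_true, if_pos, hget, Option.getD_some]
        rw [ih elem (idx + 1) _ (by omega), hdrop]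
        simp only [pvG, beq_self_eq_true, if_pos]
        rw [String.append_assoc]
      · have hne : (t == 2) = false := by simp [ht]
        simp only [pvInner, hne, Bool.false_eq_true, if_neg, not_false_iff]
        have hdc : pvDcount ((k, t) :: rest) = pvDcount rest := by
          simp [pvDcount, List.filter, hne]
        rw [hdc] at h
        rw [ih elem idx _ h]
        simp only [pvG, hne, Bool.false_eq_true, if_neg, not_false_iff]
        rw [String.append_assoc]

-- the map over the product equals pvSpec
theorem pvProd_map_pvG (R : List (Char × Nat)) (hpos : ∀ p ∈ R, 1 ≤ p.2) :
    (pvProd12 (pvDcount (R.map (fun p => (p.1, if 2 ≤ p.2 then 2 else 1))))).map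
      (fun elem => pvG (R.map (fun p => (p.1, if 2 ≤ p.2 then 2 else 1))) elem)
      = pvSpec R := by
  induction R with
  | nil => simp [pvProd12, pvG, pvSpec, pvDcount]
  | cons p rest ih =>
      obtain ⟨k, n⟩ := p
      have hn : 1 ≤ n := hpos (k, n) (by simp)
      have ih' := ih (fun q hq => hpos q (List.mem_cons_of_mem _ hq))
      by_cases h2 : 2 ≤ n
      · have hn1 : (n == 1) = false := by simp; omega
        have hcap : ((k, n) :: rest).map (fun p => (p.1, if 2 ≤ p.2 then 2 else 1))
            = (k, 2) :: rest.map (fun p => (p.1, if 2 ≤ p.2 then 2 else 1)) := by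
          simp [h2]
        rw [hcap]
        have hdc : pvDcount ((k, 2) :: rest.map (fun p => (p.1, if 2 ≤ p.2 then 2 else 1)))
            = pvDcount (rest.map (fun p => (p.1, if 2 ≤ p.2 then 2 else 1))) + 1 := by
          simp [pvDcount, List.filter]
        rw [hdc]
        simp only [pvProd12, List.map_flatMap, List.map_map]
        simp only [pvSpec, hn1, Bool.false_eq_true, if_neg, not_false_iff]
        simp only [List.flatMap_cons, List.flatMap_nil, List.append_nil]
        rw [← ih']
        simp [pvG, Function.comp_def, List.map_map]
      · have hn1 : n = 1 := by omega
        subst hn1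
        have hcap : ((k, 1) :: rest).map (fun p => (p.1, if 2 ≤ p.2 then 2 else 1))
            = (k, 1) :: rest.map (fun p => (p.1, if 2 ≤ p.2 then 2 else 1)) := by
          simp
        rw [hcap]
        have hdc : pvDcount ((k, 1) :: rest.map (fun p => (p.1, if 2 ≤ p.2 then 2 else 1)))
            = pvDcount (rest.map (fun p => (p.1, if 2 ≤ p.2 then 2 else 1))) := by
          simp [pvDcount, List.filter]
        rw [hdc]
        simp only [pvSpec, beq_self_eq_true, if_pos, List.flatMap_cons, List.flatMap_nil,
          List.append_nil]
        rw [← ih']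
        simp [pvG, List.map_map, Function.comp_def]

-- B's fold characterised
theorem pvFold_eq (R : List (Char × Nat)) :
    ∀ (acc : List String),
      R.foldl
        (fun acc p =>
          let opts := if p.2 == 1 then [String.ofList [p.1]] else [String.ofList [p.1], String.ofList [p.1, p.1]]
          acc.flatMap (fun pre => opts.map (fun o => pre ++ o)))
        acc
      = acc.flatMap (fun pre => (pvSpec R).map (fun s => pre ++ s)) := by
  induction R with
  | nil => intro acc; simp [pvSpec]
  | cons p rest ih =>
      intro acc
      obtain ⟨k, n⟩ := p
      simp only [List.foldl_cons]
      rw [ih]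
      simp only [pvSpec, List.flatMap_map, List.map_flatMap, List.flatMap_assoc, List.map_map]
      refine List.flatMap_congr ?_
      intro pre _
      simp [Function.comp_def, String.append_assoc]

-- ===== VERDICT (by name: the statement is the Claim_ definition above) =====
theorem eliminate_duplicate_spec : Claim_equal_eliminate_duplicate := by
  intro word _
  unfold Spec_eliminate_duplicate eliminate_duplicate eliminate_duplicate_alt
  set R := pvRuns word.toList with hR
  set enum := R.map (fun p => (p.1, if 2 ≤ p.2 then 2 else 1)) with henum
  rw [pvFold_eq]
  have hA : (pvProd12 (pvDcount enum)).map (fun elem => pvInner enum elem 0 "") =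
      (pvProd12 (pvDcount enum)).map (fun elem => pvG enum elem) := by
    apply List.map_congr_left
    intro e he
    rw [pvInner_eq_pvG enum e 0 "" (by rw [pvProd12_length _ e he]; omega)]
    simp
  simp only [pvDcount] at hA ⊢
  rw [hA]
  have := pvProd_map_pvG R (pvRuns_pos word.toList)
  simp only [pvDcount] at this
  rw [this]
  simp
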